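-- pv_equiv track=rewrite | github.com/hny3494317690/polymarket-trading-bot | apps/webui.py | _format_env_value
-- ===== SOURCE A (Python) =====
-- def _format_env_value(value: str) -> str:
--     """Quote env values when needed."""
--     if value == "":
--         return '""'
--
--     needs_quotes = any(ch in value for ch in (" ", "#", "\t", "\n", '"'))
--     if not needs_quotes:
--         return value
--
--     escaped = value.replace("\\", "\\\\").replace('"', '\\"').replace("\n", "\\n")
--     return f'"{escaped}"'
-- ===== SOURCE B (Python) =====
-- def _format_env_value(value: str) -> str:
--     """Quote env values when needed (single-pass fused scan)."""
--     if value == "":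
--         return '""'
--     needs_quotes = False
--     escaped = []
--     for ch in value:
--         if ch in (' ', '#', '\t', '\n', '"'):
--             needs_quotes = True
--         if ch == '\\':
--             escaped.append('\\\\')
--         elif ch == '"':
--             escaped.append('\\"')
--         elif ch == '\n':
--             escaped.append('\\n')
--         else:
--             escaped.append(ch)
--     if not needs_quotes:
--         return value
--     return '"' + ''.join(escaped) + '"'
-- ===== Notes on version B (the rewrite author's own statement) =====
-- stated objective: alternative
-- what changed: Fuses A's five substring-containment scans and three full replace passes into one single traversal of the string that simultaneously maintains the needs_quotes flag and builds the escaped text with a per-character map.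
import Mathlib
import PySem

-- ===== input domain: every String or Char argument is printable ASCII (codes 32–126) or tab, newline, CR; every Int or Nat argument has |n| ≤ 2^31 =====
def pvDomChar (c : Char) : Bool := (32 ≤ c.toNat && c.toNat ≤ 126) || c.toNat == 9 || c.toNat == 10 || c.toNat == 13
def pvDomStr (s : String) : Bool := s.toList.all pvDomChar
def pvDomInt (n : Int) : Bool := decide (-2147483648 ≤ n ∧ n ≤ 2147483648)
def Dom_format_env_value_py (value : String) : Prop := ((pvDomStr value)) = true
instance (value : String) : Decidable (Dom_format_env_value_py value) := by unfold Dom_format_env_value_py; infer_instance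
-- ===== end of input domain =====

-- B fuses A's five containment scans and three replace passes into one traversal; same value everywhere.

-- ===== PORT A =====
def format_env_value_py (value : String) : String :=
  if value = "" then "\"\""
  else
    let needs_quotes := [" ", "#", "\t", "\n", "\""].any (fun ch => PySem.Str.isIn ch value)
    if needs_quotes = false then value
    else
      let escaped := PySem.Str.replace (PySem.Str.replace (PySem.Str.replace value "\\" "\\\\") "\"" "\\\"") "\n" "\\n"
      String.ofList ('"' :: escaped.toList ++ ['"'])

-- ===== PORT B =====
def fevNeeds (c : Char) : Bool := c = ' ' || c = '#' || c = '\t' || c = '\n' || c = '"'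

def fevEscChar (c : Char) : List Char :=
  if c = '\\' then ['\\', '\\']
  else if c = '"' then ['\\', '"']
  else if c = '\n' then ['\\', 'n']
  else [c]

def format_env_value_py_alt (value : String) : String :=
  if value = "" then "\"\""
  else
    let st := value.toList.foldl
      (fun (st : Bool × List Char) c => (st.1 || fevNeeds c, st.2 ++ fevEscChar c)) (false, [])
    if st.1 = false then value
    else String.ofList ('"' :: st.2 ++ ['"'])

-- ===== PRECONDITION & SPEC =====
def Spec_format_env_value_py (value : String) (out : String) : Prop := out = format_env_value_py_alt value
instance (value : String) (out : String) : Decidable (Spec_format_env_value_py value out) := by unfold Spec_format_env_value_py; infer_instance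

-- ===== CLAIM (what is proved, stated in full; the proofs are below) =====
def Claim_equal_format_env_value_py : Prop := ∀ (value : String), Dom_format_env_value_py value → Spec_format_env_value_py value (format_env_value_py value)

-- ===== LEMMAS AND PROOFS =====

-- single-character replace is a per-character flatMap
lemma replace_go_single (a : Char) (r : List Char) (fuel : Nat) (l acc : List Char)
    (h : l.length ≤ fuel) :
    PySem.Chars.replace.go [a] r fuel l acc
      = acc.reverse ++ l.flatMap (fun c => if c = a then r else [c]) := by
  induction l generalizing fuel acc with
  | nil => cases fuel <;> simp [PySem.Chars.replace.go]
  | cons c t ih =>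
    cases fuel with
    | zero => simp at h
    | succ n =>
      have hlen : t.length ≤ n := Nat.le_of_succ_le_succ (by simpa using h)
      by_cases hc : a = c
      · subst hc
        have hstep : PySem.Chars.replace.go [a] r (n+1) (a :: t) acc
            = PySem.Chars.replace.go [a] r n t (r.reverse ++ acc) := by
          simp [PySem.Chars.replace.go, List.isPrefixOf]
        rw [hstep, ih n _ hlen]
        simp
      · have hstep : PySem.Chars.replace.go [a] r (n+1) (c :: t) acc
            = PySem.Chars.replace.go [a] r n t (c :: acc) := by
          simp [PySem.Chars.replace.go, List.isPrefixOf, hc]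
        rw [hstep, ih n _ hlen]
        simp [List.flatMap_cons, Ne.symm hc]

lemma replace_single (a : Char) (r : List Char) (l : List Char) :
    PySem.Chars.replace l [a] r = l.flatMap (fun c => if c = a then r else [c]) := by
  rw [PySem.Chars.replace, if_neg (by simp)]
  exact replace_go_single a r l.length l [] (le_refl _)

lemma chain_eq (l : List Char) :
    PySem.Chars.replace (PySem.Chars.replace (PySem.Chars.replace l ['\\'] ['\\', '\\'])
        ['"'] ['\\', '"']) ['\n'] ['\\', 'n']
      = l.flatMap fevEscChar := by
  simp only [replace_single]
  induction l with
  | nil => simp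
  | cons c t ih =>
    simp only [List.flatMap_cons, List.flatMap_append, ih, fevEscChar]
    by_cases h1 : c = '\\'
    · subst h1; simp
    · by_cases h2 : c = '"'
      · subst h2; simp
      · by_cases h3 : c = '\n'
        · subst h3; simp
        · simp [h1, h2, h3]

lemma foldl_or_any (f : Char → Bool) (l : List Char) (b : Bool) :
    l.foldl (fun acc c => acc || f c) b = (b || l.any f) := by
  induction l generalizing b with
  | nil => simp
  | cons c t ih => simp [List.foldl_cons, ih, Bool.or_assoc]

lemma needs_eq (value : String) :
    ([" ", "#", "\t", "\n", "\""].any (fun ch => PySem.Str.isIn ch value))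
      = value.toList.any fevNeeds := by
  have h : ∀ a : Char, (PySem.Chars.isIn [a] value.toList = true) ↔ a ∈ value.toList := by
    intro a
    rw [PySem.Chars.isIn_iff_infix, List.singleton_infix_iff]
  have hs1 : (" " : String).toList = [' '] := rfl
  have hs2 : ("#" : String).toList = ['#'] := rfl
  have hs3 : ("\t" : String).toList = ['\t'] := rfl
  have hs4 : ("\n" : String).toList = ['\n'] := rfl
  have hs5 : ("\"" : String).toList = ['"'] := rfl
  rw [Bool.eq_iff_iff]
  simp only [List.any_cons, List.any_nil, Bool.or_false, PySem.Str.isIn_eq, Bool.or_eq_true,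
    List.any_eq_true, hs1, hs2, hs3, hs4, hs5, h]
  constructor
  · rintro (hm | hm | hm | hm | hm) <;> exact ⟨_, hm, by decide⟩
  · rintro ⟨a, ha, hf⟩
    simp only [fevNeeds, Bool.or_eq_true, decide_eq_true_eq] at hf
    rcases hf with ((((h | h) | h) | h) | h) <;> subst h <;> simp [ha]

-- ===== VERDICT (by name: the statement is the Claim_ definition above) =====
theorem format_env_value_py_spec : Claim_equal_format_env_value_py := by
  intro value _
  unfold Spec_format_env_value_py format_env_value_py format_env_value_py_alt
  by_cases hv : value = ""
  · simp [hv]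
  · simp only [if_neg hv]
    simp only [PySem.List.foldl_prod_mk (fun b c => b || fevNeeds c)
        (fun acc c => acc ++ fevEscChar c),
      foldl_or_any, PySem.List.foldl_append_eq_flatMap, Bool.false_or, List.nil_append, needs_eq]
    by_cases hn : value.toList.any fevNeeds = false
    · simp [hn]
    · simp only [if_neg hn]
      refine congrArg String.ofList ?_
      simp only [PySem.Str.toList_replace]
      have h1 : ("\\" : String).toList = ['\\'] := rfl
      have h2 : ("\\\\" : String).toList = ['\\', '\\'] := rfl
      have h3 : ("\"" : String).toList = ['"'] := rfl
      have h4 : ("\\\"" : String).toList = ['\\', '"'] := rfl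
      have h5 : ("\n" : String).toList = ['\n'] := rfl
      have h6 : ("\\n" : String).toList = ['\\', 'n'] := rfl
      rw [h1, h2, h3, h4, h5, h6, chain_eq]
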